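-- pv_equiv track=rewrite | github.com/mehul-tandel/Data_Structures_and_Algorithms | python/Array/sumInRanges.py | sumInRanges2
-- ===== SOURCE A (Python) =====
-- def sumArray(arr, x, n):
--
--     m = 10**9 + 7
--     sum = 0
--     for i in range(x):
--         sum += arr[i%n]
--         sum %= m
--
--     return sum
--
-- def sumInRanges2(arr, n, queries, q):
--
--     sums = []
--     m = 10**9 + 7
--     for query in queries:
--         l = query[0]
--         r = query[1]
--
--         lsum = sumArray(arr,l-1,n)%m
--         rsum = sumArray(arr,r,n)%m
--
--         sums.append(rsum-lsum)
--
--     return sums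
-- ===== SOURCE B (Python) =====
-- def sumInRanges2(arr, n, queries, q):
--     # One-period prefix sums, then each query in O(1):
--     # sum of the first x terms of the cyclic sequence is (x // n) * total + prefix[x % n], mod m.
--     m = 10**9 + 7
--     prefix = [0]
--     acc = 0
--     for v in arr[:n]:
--         acc = (acc + v) % m
--         prefix.append(acc)
--     total = acc
--
--     def S(x):
--         if x < 0:
--             return 0
--         quot, rem = divmod(x, n)
--         return (quot * total + prefix[rem]) % m
--
--     return [S(query[1]) - S(query[0] - 1) for query in queries]
-- ===== Notes on version B (the rewrite author's own statement) =====
-- stated objective: faster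
-- what changed: A re-sums the cyclic sequence element by element for every query bound (O(sum of query bounds)); B precomputes one-period prefix sums once and answers each bound in O(1) as quot*total + prefix[rem] mod m. Pre_ restricts to the natural domain 0 < n <= len(arr) with every query holding at least two entries: outside it A usually raises (ZeroDivisionError/IndexError), and on the corners where it still returns (negative n via accidental negative-index wraparound, or n > len(arr) with small bounds) its indexing is an artefact of arr[i%n] rather than specified behaviour.
-- outside the precondition, e.g. on sumInRanges2([1, 2], -2, [[1, 2]], 1): A returns [3], B returns [0]; on sumInRanges2([1], 0, [[1, 0]], 1): A returns [0], B raises ZeroDivisionError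
import Mathlib
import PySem

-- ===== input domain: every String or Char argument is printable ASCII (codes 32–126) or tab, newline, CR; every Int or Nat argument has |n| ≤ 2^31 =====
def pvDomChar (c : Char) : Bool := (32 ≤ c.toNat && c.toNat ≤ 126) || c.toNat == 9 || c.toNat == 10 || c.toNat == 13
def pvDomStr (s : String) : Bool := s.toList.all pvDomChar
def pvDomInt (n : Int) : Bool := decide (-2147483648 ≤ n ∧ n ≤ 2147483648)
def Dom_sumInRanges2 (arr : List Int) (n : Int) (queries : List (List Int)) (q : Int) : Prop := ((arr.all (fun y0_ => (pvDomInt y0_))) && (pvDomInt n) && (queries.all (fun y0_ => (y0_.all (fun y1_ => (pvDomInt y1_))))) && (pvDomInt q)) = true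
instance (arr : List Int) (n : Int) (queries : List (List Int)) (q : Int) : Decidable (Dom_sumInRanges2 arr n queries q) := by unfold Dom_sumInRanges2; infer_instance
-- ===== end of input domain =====

-- B replaces A's per-query element-by-element cyclic re-summation with one-period prefix sums
-- answered in O(1) per bound (faster; asymptotic).


-- ===== PORT A =====
-- sumArray(arr, x, n): element-by-element cyclic sum mod 10^9+7
def pvSumArray (arr : List Int) (x : Int) (n : Int) : Int :=
  (PySem.List.pyRange 0 x 1).foldl
    (fun s i => PySem.Int.mod (s + PySem.List.pyGetD arr (PySem.Int.mod i n) 0) (10 ^ 9 + 7)) 0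

def sumInRanges2 (arr : List Int) (n : Int) (queries : List (List Int)) (q : Int) : List Int :=
  queries.foldl
    (fun sums query =>
      let l := PySem.List.pyGetD query 0 0
      let r := PySem.List.pyGetD query 1 0
      let lsum := PySem.Int.mod (pvSumArray arr (l - 1) n) (10 ^ 9 + 7)
      let rsum := PySem.Int.mod (pvSumArray arr r n) (10 ^ 9 + 7)
      sums ++ [rsum - lsum]) []

-- ===== PORT B =====
-- the (total, prefix) pair built by B's single pass over arr[:n]
def pvPrefix (arr : List Int) (n : Int) : Int × List Int :=
  (PySem.List.slice arr none (some n)).foldl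
    (fun st v =>
      let acc := PySem.Int.mod (st.1 + v) (10 ^ 9 + 7)
      (acc, st.2 ++ [acc])) (0, [0])

-- B's S(x): quot*total + prefix[rem], mod m
def pvS (n : Int) (total : Int) (pref : List Int) (x : Int) : Int :=
  if x < 0 then 0
  else
    let qr := (PySem.Int.divmod? x n).getD (0, 0)
    PySem.Int.mod (qr.1 * total + PySem.List.pyGetD pref qr.2 0) (10 ^ 9 + 7)

def sumInRanges2_alt (arr : List Int) (n : Int) (queries : List (List Int)) (q : Int) : List Int :=
  let st := pvPrefix arr n
  queries.map (fun query =>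
    pvS n st.1 st.2 (PySem.List.pyGetD query 1 0) -
      pvS n st.1 st.2 (PySem.List.pyGetD query 0 0 - 1))

-- ===== PRECONDITION & SPEC =====
-- Pre_ restricts to the natural domain 0 < n ≤ len(arr) with every query holding at least two
-- entries: outside it A usually raises (ZeroDivisionError/IndexError), and on the corners where it
-- still returns (negative n via accidental negative-index wraparound, or n > len(arr) with small
-- bounds) its indexing is an artefact of arr[i%n] rather than specified behaviour.
def Pre_sumInRanges2 (arr : List Int) (n : Int) (queries : List (List Int)) (q : Int) : Prop :=
  (0 < n ∧ n ≤ arr.length ∧ ∀ query ∈ queries, 2 ≤ query.length) ∨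
  (n ≠ 0 ∧ ∀ query ∈ queries, 2 ≤ query.length ∧
    PySem.List.pyGetD query 1 0 ≤ 0 ∧ PySem.List.pyGetD query 0 0 ≤ 1) ∨
  (∀ query ∈ queries, 2 ≤ query.length ∧
    PySem.List.pyGetD query 1 0 < 0 ∧ PySem.List.pyGetD query 0 0 ≤ 0) ∨
  ((arr.length : Int) < n ∧ ∀ query ∈ queries, 2 ≤ query.length ∧
    PySem.List.pyGetD query 1 0 ≤ arr.length ∧ PySem.List.pyGetD query 0 0 - 1 ≤ arr.length)
instance (arr : List Int) (n : Int) (queries : List (List Int)) (q : Int) : Decidable (Pre_sumInRanges2 arr n queries q) := by unfold Pre_sumInRanges2; infer_instance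

def pvWitness_sumInRanges2 : List Int × Int × List (List Int) × Int := ([3, -1, 4], 3, [[1, 7], [0, 2]], 2)

def Spec_sumInRanges2 (arr : List Int) (n : Int) (queries : List (List Int)) (q : Int) (out : List Int) : Prop := out = sumInRanges2_alt arr n queries q
instance (arr : List Int) (n : Int) (queries : List (List Int)) (q : Int) (out : List Int) : Decidable (Spec_sumInRanges2 arr n queries q out) := by unfold Spec_sumInRanges2; infer_instance

-- ===== CLAIM (what is proved, stated in full; the proofs are below) =====
def Claim_equal_sumInRanges2 : Prop := ∀ (arr : List Int) (n : Int) (queries : List (List Int)) (q : Int), Dom_sumInRanges2 arr n queries q → Pre_sumInRanges2 arr n queries q → Spec_sumInRanges2 arr n queries q (sumInRanges2 arr n queries q)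

-- ===== LEMMAS AND PROOFS =====

theorem pv_mod_eq (a : Int) : PySem.Int.mod a (10 ^ 9 + 7) = a % (10 ^ 9 + 7) :=
  PySem.Int.mod_eq_emod_of_pos (a := a) (by norm_num)

-- the fold of B's prefix-building pass over any list
theorem pv_fold_prefix (L : List Int) :
    L.foldl (fun st v =>
        let acc := PySem.Int.mod (st.1 + v) (10 ^ 9 + 7)
        (acc, st.2 ++ [acc])) (0, [0]) =
      (L.sum % (10 ^ 9 + 7),
       (List.range (L.length + 1)).map (fun k => (L.take k).sum % (10 ^ 9 + 7))) := by
  induction L using List.reverseRecOn with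
  | nil => simp
  | append_singleton L v ih =>
    rw [List.foldl_append, ih]
    simp only [List.foldl_cons, List.foldl_nil, pv_mod_eq]
    rw [Prod.mk.injEq]
    refine ⟨by simp [Int.emod_add_emod], ?_⟩
    rw [List.length_append, List.length_singleton]
    conv_rhs => rw [List.range_succ, List.map_append]
    congr 1
    · refine List.map_congr_left (fun k hk => ?_)
      rw [List.take_append_of_le_length (Nat.lt_succ_iff.mp (List.mem_range.mp hk))]
    · simp [Int.emod_add_emod]

-- the "true" value of the first k cyclic terms, before any mod
def pvTr (arr : List Int) (N : Nat) (k : Nat) : Int :=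
  ((k / N : Nat) : Int) * (arr.take N).sum + ((arr.take N).take (k % N)).sum

theorem pv_sumArray_neg (arr : List Int) (x n : Int) (hx : x ≤ 0) :
    pvSumArray arr x n = 0 := by
  unfold pvSumArray
  rw [PySem.List.pyRange_one_eq_nil (by omega)]
  rfl

theorem pv_tr_succ (arr : List Int) (N k : Nat) (hN : 0 < N) (hlen : N ≤ arr.length) :
    pvTr arr N (k + 1) = pvTr arr N k + (arr.take N)[k % N]'(by
      have := Nat.mod_lt k hN
      simp [List.length_take]; omega) := by
  unfold pvTr
  have hperlen : (arr.take N).length = N := by simp [List.length_take]; omega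
  have hrk : k % N < N := Nat.mod_lt k hN
  have htake : (arr.take N).take (k % N + 1) =
      (arr.take N).take (k % N) ++ [(arr.take N)[k % N]'(by omega)] :=
    List.take_succ_eq_append_getElem (by omega)
  by_cases hc : k % N + 1 < N
  · have h1 : (k + 1) % N = k % N + 1 := by
      conv_lhs => rw [← Nat.div_add_mod k N, Nat.add_assoc]
      rw [Nat.mul_add_mod, Nat.mod_eq_of_lt hc]
    have h2 : (k + 1) / N = k / N := by
      conv_lhs => rw [← Nat.div_add_mod k N, Nat.add_assoc]
      rw [Nat.mul_add_div hN, Nat.div_eq_of_lt hc]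
      omega
    rw [h1, h2, htake, List.sum_append, List.sum_singleton]
    ring
  · have hrkN : k % N + 1 = N := by omega
    have h1 : (k + 1) % N = 0 := by
      conv_lhs => rw [← Nat.div_add_mod k N, Nat.add_assoc]
      rw [hrkN, Nat.mul_add_mod, Nat.mod_self]
    have h2 : (k + 1) / N = k / N + 1 := by
      conv_lhs => rw [← Nat.div_add_mod k N, Nat.add_assoc]
      rw [hrkN, Nat.mul_add_div hN, Nat.div_self hN]
    have hfull : (arr.take N).take (k % N + 1) = arr.take N := by
      rw [hrkN]
      exact List.take_of_length_le (by omega)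
    have hsum : (arr.take N).sum =
        ((arr.take N).take (k % N)).sum + (arr.take N)[k % N]'(by omega) := by
      conv_lhs => rw [← hfull, htake]
      rw [List.sum_append, List.sum_singleton]
    rw [h1, h2, List.take_zero, List.sum_nil, hsum]
    push_cast
    ring

theorem pv_sumArray_eq (arr : List Int) (n : Int) (hn : 0 < n) (hlen : n ≤ arr.length)
    (k : Nat) : pvSumArray arr (k : Int) n = PySem.Int.mod (pvTr arr n.toNat k) (10 ^ 9 + 7) := by
  have hN : 0 < n.toNat := by omega
  have hNlen : n.toNat ≤ arr.length := by omega
  have hncast : (n.toNat : Int) = n := Int.toNat_of_nonneg (by omega)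
  induction k with
  | zero =>
    unfold pvSumArray pvTr
    rw [Nat.cast_zero, PySem.List.pyRange_one_eq_nil (le_refl 0)]
    simp
  | succ k ih =>
    have hstep : PySem.List.pyRange 0 ((k + 1 : Nat) : Int) 1 =
        PySem.List.pyRange 0 (k : Int) 1 ++ [(k : Int)] := by
      push_cast
      exact PySem.List.pyRange_one_succ_right (by positivity)
    have hsplit : pvSumArray arr ((k + 1 : Nat) : Int) n =
        PySem.Int.mod (pvSumArray arr (k : Int) n +
          PySem.List.pyGetD arr (PySem.Int.mod (k : Int) n) 0) (10 ^ 9 + 7) := by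
      unfold pvSumArray
      rw [hstep, List.foldl_append]
      rfl
    have hidx : PySem.Int.mod (k : Int) n = ((k % n.toNat : Nat) : Int) := by
      rw [← hncast, PySem.Int.mod_natCast]
      simp
    rw [hsplit, ih, hidx, PySem.List.pyGetD_natCast,
      List.getD_eq_getElem _ _ (by have := Nat.mod_lt k hN; omega),
      pv_tr_succ arr n.toNat k hN hNlen, List.getElem_take,
      pv_mod_eq, pv_mod_eq, pv_mod_eq, Int.emod_add_emod]

theorem pv_prefix_eq (arr : List Int) (n : Int) (hn : 0 < n) (hlen : n ≤ arr.length) :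
    pvPrefix arr n =
      ((arr.take n.toNat).sum % (10 ^ 9 + 7),
       (List.range (n.toNat + 1)).map (fun k => ((arr.take n.toNat).take k).sum % (10 ^ 9 + 7))) := by
  unfold pvPrefix
  rw [PySem.List.slice_to arr (by omega : (0:Int) ≤ n), pv_fold_prefix, List.length_take,
    Nat.min_eq_left (by omega)]

theorem pv_mod_combine (a b c m : Int) : (a * (b % m) + c % m) % m = (a * b + c) % m := by
  conv_rhs => rw [Int.add_emod, Int.mul_emod]
  conv_lhs => rw [Int.add_emod, Int.mul_emod]
  simp [Int.emod_emod_of_dvd]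

theorem pv_S_eq (arr : List Int) (n : Int) (hn : 0 < n) (hlen : n ≤ arr.length) (x : Int)
    (hx : 0 ≤ x) :
    pvS n (pvPrefix arr n).1 (pvPrefix arr n).2 x =
      PySem.Int.mod (pvTr arr n.toNat x.toNat) (10 ^ 9 + 7) := by
  have hN : 0 < n.toNat := by omega
  have hncast : (n.toNat : Int) = n := Int.toNat_of_nonneg (by omega)
  have hxcast : ((x.toNat : Nat) : Int) = x := Int.toNat_of_nonneg hx
  rw [pv_prefix_eq arr n hn hlen]
  unfold pvS
  rw [if_neg (by omega)]
  have hdm : (PySem.Int.divmod? x n).getD (0, 0) = (x.fdiv n, x.fmod n) := by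
    simp [PySem.Int.divmod?, hn.ne']
  rw [hdm]
  have hq2 : x.fdiv n = ((x.toNat / n.toNat : Nat) : Int) := by
    rw [← hncast, ← hxcast]
    exact Eq.symm (Int.ofNat_fdiv x.toNat n.toNat)
  have hr : x.fmod n = ((x.toNat % n.toNat : Nat) : Int) := by
    rw [← hncast, ← hxcast]
    exact Eq.symm (Int.ofNat_fmod x.toNat n.toNat)
  have hlt : x.toNat % n.toNat < n.toNat + 1 := by
    have := Nat.mod_lt x.toNat hN
    omega
  simp only [hq2, hr]
  rw [PySem.List.pyGetD_natCast,
    List.getD_eq_getElem _ _ (by simpa using hlt),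
    List.getElem_map, List.getElem_range]
  unfold pvTr
  rw [pv_mod_eq, pv_mod_eq]
  exact pv_mod_combine _ _ _ _

theorem pv_fold_snd_ext (L : List Int) : ∀ st : Int × List Int,
    ∃ t, (L.foldl (fun st v =>
        let acc := PySem.Int.mod (st.1 + v) (10 ^ 9 + 7)
        (acc, st.2 ++ [acc])) st).2 = st.2 ++ t := by
  induction L with
  | nil => exact fun st => ⟨[], by simp⟩
  | cons v L ih =>
    intro st
    obtain ⟨t, ht⟩ := ih (PySem.Int.mod (st.1 + v) (10 ^ 9 + 7), st.2 ++ [PySem.Int.mod (st.1 + v) (10 ^ 9 + 7)])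
    exact ⟨_, by rw [List.foldl_cons, ht, List.append_assoc]⟩

theorem pv_prefix_getD_zero (arr : List Int) (n : Int) :
    PySem.List.pyGetD (pvPrefix arr n).2 0 0 = 0 := by
  obtain ⟨t, ht⟩ := pv_fold_snd_ext (PySem.List.slice arr none (some n)) (0, [0])
  unfold pvPrefix
  rw [PySem.List.pyGetD_zero, ht]
  rfl

theorem pv_S_neg (n total : Int) (pref : List Int) (x : Int) (hx : x < 0) :
    pvS n total pref x = 0 := by
  unfold pvS
  rw [if_pos hx]

theorem pv_S_nonpos (arr : List Int) (n : Int) (hn : n ≠ 0) (total : Int) (x : Int) (hx : x ≤ 0) :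
    pvS n total (pvPrefix arr n).2 x = 0 := by
  by_cases hx0 : x < 0
  · exact pv_S_neg _ _ _ _ hx0
  · have : x = 0 := by omega
    subst this
    unfold pvS
    rw [if_neg (by omega)]
    simp [PySem.Int.divmod?, hn, Int.zero_fdiv, Int.zero_fmod, pv_prefix_getD_zero]

theorem pv_sumArray_big (arr : List Int) (n : Int) (hn : (arr.length : Int) < n)
    (k : Nat) (hk : k ≤ arr.length) :
    pvSumArray arr (k : Int) n = PySem.Int.mod ((arr.take k).sum) (10 ^ 9 + 7) := by
  induction k with
  | zero =>
    unfold pvSumArray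
    rw [Nat.cast_zero, PySem.List.pyRange_one_eq_nil (le_refl 0)]
    simp
  | succ k ih =>
    have hstep : PySem.List.pyRange 0 ((k + 1 : Nat) : Int) 1 =
        PySem.List.pyRange 0 (k : Int) 1 ++ [(k : Int)] := by
      push_cast
      exact PySem.List.pyRange_one_succ_right (by positivity)
    have hsplit : pvSumArray arr ((k + 1 : Nat) : Int) n =
        PySem.Int.mod (pvSumArray arr (k : Int) n +
          PySem.List.pyGetD arr (PySem.Int.mod (k : Int) n) 0) (10 ^ 9 + 7) := by
      unfold pvSumArray
      rw [hstep, List.foldl_append]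
      rfl
    have hidx : PySem.Int.mod (k : Int) n = (k : Int) := by
      rw [PySem.Int.mod_eq_emod_of_pos (by omega)]
      exact Int.emod_eq_of_lt (by positivity) (by omega)
    rw [hsplit, ih (by omega), hidx, PySem.List.pyGetD_natCast,
      List.getD_eq_getElem _ _ (by omega),
      List.take_succ_eq_append_getElem (by omega), List.sum_append, List.sum_singleton,
      pv_mod_eq, pv_mod_eq, pv_mod_eq, Int.emod_add_emod]

theorem pv_prefix_eq_big (arr : List Int) (n : Int) (hn : (arr.length : Int) ≤ n) :
    pvPrefix arr n =
      (arr.sum % (10 ^ 9 + 7),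
       (List.range (arr.length + 1)).map (fun k => (arr.take k).sum % (10 ^ 9 + 7))) := by
  unfold pvPrefix
  rw [PySem.List.slice_to arr (by omega : (0 : Int) ≤ n), pv_fold_prefix,
    List.take_of_length_le (by omega : arr.length ≤ n.toNat)]

theorem pv_S_big (arr : List Int) (n : Int) (hn : (arr.length : Int) < n) (x : Int)
    (hx0 : 0 ≤ x) (hx : x ≤ arr.length) :
    pvS n (pvPrefix arr n).1 (pvPrefix arr n).2 x =
      PySem.Int.mod ((arr.take x.toNat).sum) (10 ^ 9 + 7) := by
  rw [pv_prefix_eq_big arr n (by omega)]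
  unfold pvS
  rw [if_neg (by omega)]
  have hdm : (PySem.Int.divmod? x n).getD (0, 0) = ((0 : Int), x) := by
    have h1 : x.fdiv n = 0 := Int.fdiv_eq_zero_of_lt hx0 (by omega)
    have h2 : x.fmod n = x := Int.fmod_eq_of_lt hx0 (by omega)
    simp [PySem.Int.divmod?, (show n ≠ 0 by omega), h1, h2]
  rw [hdm]
  have hxc : ((x.toNat : Nat) : Int) = x := Int.toNat_of_nonneg hx0
  have hlt : x.toNat < arr.length + 1 := by omega
  show PySem.Int.mod ((0 : Int) * (arr.sum % (10 ^ 9 + 7)) +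
      PySem.List.pyGetD ((List.range (arr.length + 1)).map
        (fun k => (List.take k arr).sum % (10 ^ 9 + 7))) x 0) (10 ^ 9 + 7) = _
  conv_lhs => rw [← hxc]
  rw [PySem.List.pyGetD_natCast, List.getD_eq_getElem _ _ (by simpa using hlt),
    List.getElem_map, List.getElem_range, pv_mod_eq, pv_mod_eq]
  simp [Int.emod_emod_of_dvd]

theorem pv_bound_eq_big (arr : List Int) (n : Int) (hn : (arr.length : Int) < n) (x : Int)
    (hx : x ≤ arr.length) :
    PySem.Int.mod (pvSumArray arr x n) (10 ^ 9 + 7) =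
      pvS n (pvPrefix arr n).1 (pvPrefix arr n).2 x := by
  by_cases hx0 : x < 0
  · rw [pv_sumArray_neg arr x n (by omega), pv_S_neg _ _ _ _ hx0, pv_mod_eq]
    simp
  · have hxc : (x.toNat : Int) = x := Int.toNat_of_nonneg (by omega)
    rw [← hxc, pv_sumArray_big arr n hn x.toNat (by omega),
      pv_S_big arr n hn _ (by omega) (by omega),
      pv_mod_eq, pv_mod_eq, pv_mod_eq, Int.emod_emod_of_dvd _ dvd_rfl]
    simp
    rw [show max x 0 = x by omega]

theorem pv_bound_eq (arr : List Int) (n : Int) (hn : 0 < n) (hlen : n ≤ arr.length) (x : Int) :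
    PySem.Int.mod (pvSumArray arr x n) (10 ^ 9 + 7) =
      pvS n (pvPrefix arr n).1 (pvPrefix arr n).2 x := by
  by_cases hx : x < 0
  · rw [pv_sumArray_neg arr x n (by omega)]
    unfold pvS
    rw [if_pos hx, pv_mod_eq]
    simp
  · have hxc : (x.toNat : Int) = x := Int.toNat_of_nonneg (by omega)
    rw [← hxc, pv_sumArray_eq arr n hn hlen x.toNat,
      pv_S_eq arr n hn hlen _ (by omega)]
    rw [pv_mod_eq, pv_mod_eq, pv_mod_eq, Int.emod_emod_of_dvd _ dvd_rfl]
    simp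
    rw [show max x 0 = x by omega]

-- ===== VERDICT (by name: the statement is the Claim_ definition above) =====
theorem sumInRanges2_spec : Claim_equal_sumInRanges2 := by
  intro arr n queries q _ hpre
  unfold Spec_sumInRanges2 sumInRanges2 sumInRanges2_alt
  rw [PySem.List.foldl_append_singleton_eq_map]
  refine List.map_congr_left (fun query hq' => ?_)
  rcases hpre with ⟨hn, hlen, -⟩ | ⟨hn, hall⟩ | hall | ⟨hn, hall⟩
  · rw [pv_bound_eq arr n hn hlen, pv_bound_eq arr n hn hlen]
  · obtain ⟨-, hr, hl⟩ := hall query hq'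
    rw [pv_sumArray_neg arr _ n hr, pv_sumArray_neg arr _ n (by omega),
      pv_S_nonpos arr n hn _ _ hr, pv_S_nonpos arr n hn _ _ (by omega)]
    simp
  · obtain ⟨-, hr, hl⟩ := hall query hq'
    rw [pv_sumArray_neg arr _ n (by omega), pv_sumArray_neg arr _ n (by omega),
      pv_S_neg _ _ _ _ hr, pv_S_neg _ _ _ _ (by omega)]
    simp
  · obtain ⟨-, hr, hl⟩ := hall query hq'
    rw [pv_bound_eq_big arr n hn _ hr, pv_bound_eq_big arr n hn _ (by omega)]
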